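-- pv_equiv track=rewrite | github.com/xynnnaaa/Sampler_CE | join_sampling/v3_wanderjoin/wander_join.py | _translate_pid_bitmap
-- ===== SOURCE A (Python) =====
-- def _translate_pid_bitmap(pid_bitmap_str, pid_map, global_mask_int):
--     """
--     将数据库读出的 PID Bitmap (str) 翻译为 QID Bitmap (int).
--     Args:
--         pid_bitmap_str: 例如 '10100...' (Postgres BIT VARYING)
--         pid_map: { pid(int): qid_mask(int) }
--         global_mask_int: 该表的全局 QID Mask (int)
--     Returns:
--         qid_mask (int)
--     """
--     result_mask = global_mask_int
--
--     if not pid_bitmap_str: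
--         return result_mask
--
--     pos = pid_bitmap_str.find('1')
--     while pos != -1:
--         result_mask |= pid_map.get(pos, 0)
--         pos = pid_bitmap_str.find('1', pos + 1)
--
--     return result_mask
-- ===== SOURCE B (Python) =====
-- def _translate_pid_bitmap(pid_bitmap_str, pid_map, global_mask_int):
--     # Iterate the map and probe the bitmap, instead of find-scanning the
--     # bitmap and looking up the map.
--     result_mask = global_mask_int
--     n = len(pid_bitmap_str)
--     for pid, mask in pid_map.items():
--         if 0 <= pid < n and pid_bitmap_str[pid] == '1':
--             result_mask |= mask
--     return result_mask
-- ===== Notes on version B (the rewrite author's own statement) =====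
-- stated objective: alternative
-- what changed: B loops over pid_map.items() and probes the bitmap character at each pid, instead of A's repeated str.find('1') scan over the bitmap with a dict lookup per hit; OR is order-independent so the result is identical.
import Mathlib
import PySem

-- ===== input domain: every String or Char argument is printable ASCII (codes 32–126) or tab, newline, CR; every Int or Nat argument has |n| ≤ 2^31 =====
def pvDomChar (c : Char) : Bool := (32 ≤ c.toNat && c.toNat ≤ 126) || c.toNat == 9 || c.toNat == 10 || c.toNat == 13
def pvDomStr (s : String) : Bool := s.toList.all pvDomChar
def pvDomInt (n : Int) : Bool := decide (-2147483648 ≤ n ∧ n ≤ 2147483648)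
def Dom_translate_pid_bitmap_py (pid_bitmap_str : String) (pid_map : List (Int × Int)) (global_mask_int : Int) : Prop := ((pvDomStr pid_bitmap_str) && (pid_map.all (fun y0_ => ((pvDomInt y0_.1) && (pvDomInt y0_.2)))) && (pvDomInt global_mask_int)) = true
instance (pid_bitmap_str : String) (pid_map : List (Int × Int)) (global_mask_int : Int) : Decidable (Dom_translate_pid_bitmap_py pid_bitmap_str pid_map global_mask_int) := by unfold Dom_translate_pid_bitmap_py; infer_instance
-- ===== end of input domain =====

-- B loops over the dict entries and probes the bitmap character at each pid, instead of A's
-- repeated str.find('1') scan over the bitmap with a dict lookup per hit (objective: alternative).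

-- ===== PORT A =====
-- 'pos = s.find("1"); while pos != -1: result |= pid_map.get(pos, 0); pos = s.find("1", pos+1)'
-- fuel (cs.length + 1) only makes the recursion structural: found positions strictly increase
-- and are < cs.length, so fuel never runs out before pos = -1.
def aLoop (cs : List Char) (pid_map : List (Int × Int)) (fuel : Nat) (acc : Int) (pos : Int) : Int :=
  match fuel with
  | 0 => acc
  | fuel + 1 =>
    if pos = -1 then acc
    else aLoop cs pid_map fuel
      (PySem.Int.bor acc ((PySem.Dict.mk pid_map).getD pos 0))
      (PySem.Chars.findFrom cs ['1'] (pos + 1) none)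

def translate_pid_bitmap_py (pid_bitmap_str : String) (pid_map : List (Int × Int)) (global_mask_int : Int) : Int :=
  let result_mask := global_mask_int
  if pid_bitmap_str.toList = [] then result_mask
  else aLoop pid_bitmap_str.toList pid_map (pid_bitmap_str.toList.length + 1) result_mask
    (PySem.Chars.find pid_bitmap_str.toList ['1'])

-- ===== PORT B =====
-- 'for pid, mask in pid_map.items(): if 0 <= pid < n and s[pid] == "1": result |= mask'
def translate_pid_bitmap_py_alt (pid_bitmap_str : String) (pid_map : List (Int × Int)) (global_mask_int : Int) : Int :=
  pid_map.foldl
    (fun acc kv =>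
      if 0 ≤ kv.1 ∧ kv.1 < PySem.Str.len pid_bitmap_str ∧
          PySem.List.pyGetD pid_bitmap_str.toList kv.1 ' ' = '1'
      then PySem.Int.bor acc kv.2 else acc)
    global_mask_int

-- ===== PRECONDITION & SPEC =====
-- Pre_ excludes association lists with duplicate pids: no Python dict exhibits them, and there
-- A's first-match lookup versus B's iteration over every entry is an artefact of the list
-- representation of the dict, not of either Python program.
def Pre_translate_pid_bitmap_py (pid_bitmap_str : String) (pid_map : List (Int × Int)) (global_mask_int : Int) : Prop :=
  (pid_map.map Prod.fst).Nodup
instance (pid_bitmap_str : String) (pid_map : List (Int × Int)) (global_mask_int : Int) : Decidable (Pre_translate_pid_bitmap_py pid_bitmap_str pid_map global_mask_int) := by unfold Pre_translate_pid_bitmap_py; infer_instance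

def pvWitness_translate_pid_bitmap_py : String × (List (Int × Int)) × Int :=
  ("0110", [(1, 4), (3, 9), (7, 16)], 1)

def Spec_translate_pid_bitmap_py (pid_bitmap_str : String) (pid_map : List (Int × Int)) (global_mask_int : Int) (out : Int) : Prop := out = translate_pid_bitmap_py_alt pid_bitmap_str pid_map global_mask_int
instance (pid_bitmap_str : String) (pid_map : List (Int × Int)) (global_mask_int : Int) (out : Int) : Decidable (Spec_translate_pid_bitmap_py pid_bitmap_str pid_map global_mask_int out) := by unfold Spec_translate_pid_bitmap_py; infer_instance

-- ===== CLAIM (what is proved, stated in full; the proofs are below) =====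
def Claim_equal_translate_pid_bitmap_py : Prop := ∀ (pid_bitmap_str : String) (pid_map : List (Int × Int)) (global_mask_int : Int), Dom_translate_pid_bitmap_py pid_bitmap_str pid_map global_mask_int → Pre_translate_pid_bitmap_py pid_bitmap_str pid_map global_mask_int → Spec_translate_pid_bitmap_py pid_bitmap_str pid_map global_mask_int (translate_pid_bitmap_py pid_bitmap_str pid_map global_mask_int)

-- ===== LEMMAS AND PROOFS =====

-- Nat.ldiff in terms of subtraction (used to line PySem.Int.bor up with Int.lor).
theorem pv_nsub_land_eq_ldiff : ∀ n m : ℕ, n - (n &&& m) = n.ldiff m := by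
  intro n
  induction n using Nat.binaryRec with
  | zero => intro m; simp [Nat.ldiff]
  | bit b n ih =>
    intro m
    rw [← Nat.bit_bodd_div2 m, Nat.land_bit, Nat.ldiff_bit]
    have h1 := Nat.and_le_left (n := n) (m := m.div2)
    have h2 := ih m.div2
    cases b <;> cases m.bodd <;> simp [Nat.bit] <;> omega

theorem pv_bor_eq_lor (a b : Int) : PySem.Int.bor a b = Int.lor a b := by
  unfold PySem.Int.bor Int.lor
  rcases a with m | m <;> rcases b with n | n <;>
    simp [Int.negSucc_eq, Nat.land_comm, ← pv_nsub_land_eq_ldiff] <;> omega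

theorem pv_bor_left_comm (c a b : Int) :
    PySem.Int.bor (PySem.Int.bor c a) b = PySem.Int.bor (PySem.Int.bor c b) a := by
  simp only [pv_bor_eq_lor]
  rcases c with m | m <;> rcases a with n | n <;> rcases b with p | p <;> simp [Int.lor] <;>
    (apply Nat.eq_of_testBit_eq; intro i;
     simp [Nat.testBit_ldiff,
           Bool.or_assoc, Bool.or_comm, Bool.or_left_comm,
           Bool.and_assoc, Bool.and_comm, Bool.and_left_comm])

-- pulling one OR-ed value out of an OR fold
theorem pv_foldl_bor_out {α : Type} (h : α → Int) :
    ∀ (l : List α) (acc x : Int),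
      List.foldl (fun a i => PySem.Int.bor a (h i)) (PySem.Int.bor acc x) l =
        PySem.Int.bor (List.foldl (fun a i => PySem.Int.bor a (h i)) acc l) x := by
  intro l
  induction l with
  | nil => intro acc x; rfl
  | cons y t ih =>
    intro acc x
    simp only [List.foldl_cons]
    rw [pv_bor_left_comm, ih]

-- first-match lookup in the association list seen as the dict
def pvDget (pid_map : List (Int × Int)) (i : Int) : Int :=
  (PySem.Dict.mk pid_map).getD i 0

theorem pvDget_nil (i : Int) : pvDget [] i = 0 := rfl

theorem pv_get?_mk_append (pm : List (Int × Int)) (k v x : Int) :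
    (PySem.Dict.mk (pm ++ [(k, v)])).get? x =
      match (PySem.Dict.mk pm).get? x with
      | some w => some w
      | none => if k = x then some v else none := by
  induction pm with
  | nil =>
    simp [PySem.Dict.get?_mk_cons]
    split_ifs with h <;> simp_all [PySem.Dict.get?]
  | cons p t ih =>
    rcases p with ⟨a, b⟩
    simp only [List.cons_append, PySem.Dict.get?_mk_cons]
    by_cases h : (a == x) = true
    · simp [h]
    · simp only [h, if_false, Bool.false_eq_true]
      exact ih

-- the indices with a '1' from position k on (as naturals)
def pvOnes (cs : List Char) (k : Nat) : List Nat :=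
  (List.range cs.length).filter (fun i => decide (k ≤ i) && (cs.getD i ' ' == '1'))

theorem pv_mem_ones (cs : List Char) (k i : Nat) :
    i ∈ pvOnes cs k ↔ k ≤ i ∧ i < cs.length ∧ cs.getD i ' ' = '1' := by
  simp [pvOnes, List.mem_filter, List.mem_range]
  tauto

theorem pv_nodup_ones (cs : List Char) (k : Nat) : (pvOnes cs k).Nodup :=
  (List.nodup_range).filter _

theorem pv_ones_eq_nil (cs : List Char) (k : Nat)
    (h : ∀ i, k ≤ i → i < cs.length → cs.getD i ' ' ≠ '1') : pvOnes cs k = [] := by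
  unfold pvOnes
  rw [List.filter_eq_nil_iff]
  intro i hi
  simp only [List.mem_range] at hi
  simp only [Bool.and_eq_true, decide_eq_true_eq, beq_iff_eq, not_and]
  intro hk
  exact h i hk hi

theorem pv_ones_eq_cons (cs : List Char) (k p : Nat)
    (hk : k ≤ p) (hp : p < cs.length) (h1 : cs.getD p ' ' = '1')
    (hmin : ∀ i, k ≤ i → i < p → cs.getD i ' ' ≠ '1') :
    pvOnes cs k = p :: pvOnes cs (p + 1) := by
  have hlen : cs.length = (p + 1) + (cs.length - (p + 1)) := by omega
  unfold pvOnes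
  rw [hlen, List.range_add, List.range_succ]
  rw [List.filter_append, List.filter_append, List.filter_append, List.filter_append]
  have e1 : (List.range p).filter (fun i => decide (k ≤ i) && (cs.getD i ' ' == '1')) = [] := by
    rw [List.filter_eq_nil_iff]
    intro i hi
    simp only [List.mem_range] at hi
    simp only [Bool.and_eq_true, decide_eq_true_eq, beq_iff_eq, not_and]
    intro hki
    exact hmin i hki hi
  have e1' : (List.range p).filter (fun i => decide (p + 1 ≤ i) && (cs.getD i ' ' == '1')) = [] := by
    rw [List.filter_eq_nil_iff]
    intro i hi
    simp only [List.mem_range] at hi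
    simp only [Bool.and_eq_true, decide_eq_true_eq, beq_iff_eq, not_and]
    omega
  have e2 : ([p]).filter (fun i => decide (k ≤ i) && (cs.getD i ' ' == '1')) = [p] := by
    have hb : (decide (k ≤ p) && (cs.getD p ' ' == '1')) = true := by
      rw [h1]; simp [hk]
    rw [List.filter_cons, if_pos hb]
    rfl
  have e2' : ([p]).filter (fun i => decide (p + 1 ≤ i) && (cs.getD i ' ' == '1')) = [] := by
    have hb : (decide (p + 1 ≤ p) && (cs.getD p ' ' == '1')) = false := by
      simp
    rw [List.filter_cons, hb]
    rfl
  have e3 : (List.map (fun x => p + 1 + x) (List.range (cs.length - (p + 1)))).filter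
        (fun i => decide (k ≤ i) && (cs.getD i ' ' == '1')) =
      (List.map (fun x => p + 1 + x) (List.range (cs.length - (p + 1)))).filter
        (fun i => decide (p + 1 ≤ i) && (cs.getD i ' ' == '1')) := by
    apply List.filter_congr
    intro i hi
    simp only [List.mem_map] at hi
    obtain ⟨j, _, rfl⟩ := hi
    have ha : k ≤ p + 1 + j := by omega
    have hb : p + 1 ≤ p + 1 + j := by omega
    simp [ha, hb]
  rw [e1, e1', e2, e2', e3]
  simp

-- the scan loop of A collects exactly the '1'-positions from k on
theorem pv_aLoop_spec (cs : List Char) (pm : List (Int × Int)) :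
    ∀ (fuel k : Nat) (acc : Int), k ≤ cs.length → cs.length - k < fuel →
      aLoop cs pm fuel acc (PySem.Chars.findFrom cs ['1'] (k : Int) none) =
        (pvOnes cs k).foldl (fun (a : Int) (i : Nat) => PySem.Int.bor a (pvDget pm (i : Int))) acc := by
  intro fuel
  induction fuel with
  | zero => intro k acc hk hf; omega
  | succ f ih =>
    intro k acc hk hf
    by_cases hneg : PySem.Chars.findFrom cs ['1'] (k : Int) none = -1
    · rw [(PySem.Chars.findFrom_natCast_eq_neg_one_iff cs ['1'] k hk)] at hneg
      have hones : pvOnes cs k = [] := by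
        apply pv_ones_eq_nil
        intro i hki hi h1
        apply hneg
        have hmem : '1' ∈ cs.drop k := by
          rw [List.mem_iff_getElem]
          refine ⟨i - k, by simp; omega, ?_⟩
          rw [List.getElem_drop]
          have : cs.getD (k + (i - k)) ' ' = cs[k + (i - k)] := List.getD_eq_getElem cs ' ' (by omega)
          rw [← this]
          have : k + (i - k) = i := by omega
          rw [this]; exact h1
        obtain ⟨l₁, l₂, heq⟩ := List.append_of_mem hmem
        exact ⟨l₁, l₂, by rw [heq]; simp⟩
      rw [hones]
      rw [(PySem.Chars.findFrom_natCast_eq_neg_one_iff cs ['1'] k hk).mpr hneg]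
      simp [aLoop]
    · obtain ⟨hge, hpre, hmin⟩ := PySem.Chars.findFrom_natCast_spec cs ['1'] k hk hneg
      set pos := PySem.Chars.findFrom cs ['1'] (k : Int) none with hpos
      have hpos0 : 0 ≤ pos := le_trans (by exact_mod_cast Nat.zero_le k) hge
      set p := pos.toNat with hp
      have hplt : p < cs.length := by
        rcases hpre with ⟨t, ht⟩
        have : (cs.drop p).length ≠ 0 := by
          rw [← ht]; simp
        simp at this; omega
      have h1 : cs.getD p ' ' = '1' := by
        rw [List.drop_eq_getElem_cons hplt] at hpre
        rw [List.cons_prefix_cons] at hpre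
        rw [List.getD_eq_getElem cs ' ' hplt]
        exact hpre.1.symm
      have hkp : k ≤ p := by omega
      have hmin' : ∀ i, k ≤ i → i < p → cs.getD i ' ' ≠ '1' := by
        intro i hki hip hcontra
        apply hmin i hki hip
        have hilt : i < cs.length := by omega
        rw [List.drop_eq_getElem_cons hilt, List.cons_prefix_cons]
        constructor
        · rw [List.getD_eq_getElem cs ' ' hilt] at hcontra
          exact hcontra.symm
        · simp
      rw [pv_ones_eq_cons cs k p hkp hplt h1 hmin']
      have hcast : pos = (p : Int) := by omega
      rw [aLoop]
      rw [if_neg hneg]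
      have harg : pos + 1 = ((p + 1 : Nat) : Int) := by omega
      rw [harg]
      rw [ih (p + 1) _ (by omega) (by omega)]
      simp only [List.foldl_cons]
      rw [hcast]
      rfl

-- step function of port B, over cs
theorem pv_alt_eq_foldl (s : String) (pm : List (Int × Int)) (g : Int) :
    translate_pid_bitmap_py_alt s pm g =
      pm.foldl
        (fun acc kv =>
          if 0 ≤ kv.1 ∧ kv.1.toNat < s.toList.length ∧ s.toList.getD kv.1.toNat ' ' = '1'
          then PySem.Int.bor acc kv.2 else acc) g := by
  unfold translate_pid_bitmap_py_alt
  apply PySem.List.foldl_congr_mem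
  intro acc kv _
  by_cases h0 : 0 ≤ kv.1
  · rw [PySem.List.pyGetD_of_nonneg s.toList ' ' h0]
    have hlen : PySem.Str.len s = (s.toList.length : Int) := by simp
    rw [hlen]
    apply if_congr _ rfl rfl
    constructor
    · rintro ⟨a, b, c⟩; exact ⟨a, by omega, c⟩
    · rintro ⟨a, b, c⟩; exact ⟨a, by omega, c⟩
  · rw [if_neg (fun hc => h0 hc.1), if_neg (fun hc => h0 hc.1)]

-- main bridge: the OR over '1'-positions with dict lookups equals the OR over map entries
theorem pv_main (cs : List Char) :
    ∀ (pm : List (Int × Int)), (pm.map Prod.fst).Nodup → ∀ (g : Int),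
      (pvOnes cs 0).foldl (fun (a : Int) (i : Nat) => PySem.Int.bor a (pvDget pm (i : Int))) g =
        pm.foldl
          (fun acc kv =>
            if 0 ≤ kv.1 ∧ kv.1.toNat < cs.length ∧ cs.getD kv.1.toNat ' ' = '1'
            then PySem.Int.bor acc kv.2 else acc) g := by
  intro pm
  induction pm using List.reverseRecOn with
  | nil =>
    intro _ g
    simp only [List.foldl_nil]
    rw [PySem.List.foldl_congr_mem (g := fun a (_ : Nat) => a)]
    · exact PySem.List.foldl_ignore _ _
    · intro acc x _
      rw [pvDget_nil, PySem.Int.bor_zero]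
  | append_singleton pm' kv ih =>
    rcases kv with ⟨k, v⟩
    intro hnd g
    rw [List.map_append, List.nodup_append] at hnd
    have hnd' : (pm'.map Prod.fst).Nodup := hnd.1
    have hknotin : k ∉ pm'.map Prod.fst := by
      intro hmem
      have hk2 : k ∈ List.map Prod.fst [(k, v)] := by simp
      exact hnd.2.2 k hmem k hk2 rfl
    have hget_none : (PySem.Dict.mk pm').get? k = none := by
      rw [PySem.Dict.get?_eq_none_iff_not_mem_keys]
      simpa using hknotin
    have hdget_new : ∀ i : Int, i ≠ k → pvDget (pm' ++ [(k, v)]) i = pvDget pm' i := by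
      intro i hne
      unfold pvDget
      rw [PySem.Dict.getD_eq_get?_getD, PySem.Dict.getD_eq_get?_getD, pv_get?_mk_append]
      rcases hh : (PySem.Dict.mk pm').get? i with _ | w
      · simp [Ne.symm hne]
      · simp
    by_cases hcond : 0 ≤ k ∧ k.toNat < cs.length ∧ cs.getD k.toNat ' ' = '1'
    · obtain ⟨hk0, hklt, hk1⟩ := hcond
      have hkmem : k.toNat ∈ pvOnes cs 0 := (pv_mem_ones cs 0 k.toNat).mpr ⟨Nat.zero_le _, hklt, hk1⟩
      obtain ⟨pre, suf, hsplit⟩ := List.append_of_mem hkmem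
      have hnodup := pv_nodup_ones cs 0
      rw [hsplit] at hnodup
      have hkpre : k.toNat ∉ pre := by
        intro h
        have := List.disjoint_of_nodup_append hnodup
        exact this h (by simp)
      have hksuf : k.toNat ∉ suf := by
        have := (List.nodup_append.mp hnodup).2.1
        simp at this
        exact this.1
      have hne_of_mem : ∀ i : Nat, i ∈ pre ∨ i ∈ suf → (i : Int) ≠ k := by
        rintro i (hi | hi) he
        · apply hkpre; rwa [show k.toNat = i by omega]
        · apply hksuf; rwa [show k.toNat = i by omega]
      have hdget_k : pvDget (pm' ++ [(k, v)]) k = v := by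
        unfold pvDget
        rw [PySem.Dict.getD_eq_get?_getD, pv_get?_mk_append, hget_none]
        simp
      have hdget_old_k : pvDget pm' k = 0 := by
        unfold pvDget
        rw [PySem.Dict.getD_eq_get?_getD, hget_none]
        rfl
      -- new LHS over pre ++ k :: suf
      rw [hsplit]
      simp only [List.foldl_append, List.foldl_cons]
      have hpre_eq : ∀ (a : Int), pre.foldl (fun (a : Int) (i : Nat) => PySem.Int.bor a (pvDget (pm' ++ [(k, v)]) (i : Int))) a
          = pre.foldl (fun (a : Int) (i : Nat) => PySem.Int.bor a (pvDget pm' (i : Int))) a := by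
        intro a
        apply PySem.List.foldl_congr_mem
        intro acc x hx
        rw [hdget_new _ (hne_of_mem x (Or.inl hx))]
      have hsuf_eq : ∀ (a : Int), suf.foldl (fun (a : Int) (i : Nat) => PySem.Int.bor a (pvDget (pm' ++ [(k, v)]) (i : Int))) a
          = suf.foldl (fun (a : Int) (i : Nat) => PySem.Int.bor a (pvDget pm' (i : Int))) a := by
        intro a
        apply PySem.List.foldl_congr_mem
        intro acc x hx
        rw [hdget_new _ (hne_of_mem x (Or.inr hx))]
      rw [hpre_eq, hsuf_eq]
      have hcast : ((k.toNat : Nat) : Int) = k := by omega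
      rw [hcast, hdget_k]
      rw [pv_foldl_bor_out]
      -- RHS: the appended entry passes the test and ORs in v
      simp only [List.foldl_nil]
      have hc : (0 ≤ k ∧ k.toNat < cs.length ∧ cs.getD k.toNat ' ' = '1') := ⟨hk0, hklt, hk1⟩
      rw [if_pos hc]
      congr 1
      rw [← ih hnd' g]
      rw [hsplit]
      simp only [List.foldl_append, List.foldl_cons]
      rw [hcast, hdget_old_k, PySem.Int.bor_zero]
    · -- condition false: the appended entry contributes nothing on either side
      have hLHS : (pvOnes cs 0).foldl (fun (a : Int) (i : Nat) => PySem.Int.bor a (pvDget (pm' ++ [(k, v)]) (i : Int))) g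
          = (pvOnes cs 0).foldl (fun (a : Int) (i : Nat) => PySem.Int.bor a (pvDget pm' (i : Int))) g := by
        apply PySem.List.foldl_congr_mem
        intro acc x hx
        obtain ⟨_, hxlt, hx1⟩ := (pv_mem_ones cs 0 x).mp hx
        apply congrArg
        apply hdget_new
        intro he
        apply hcond
        refine ⟨by omega, by omega, ?_⟩
        rw [show k.toNat = x by omega]
        exact hx1
      rw [hLHS, ih hnd' g]
      rw [List.foldl_append]
      simp only [List.foldl_cons, List.foldl_nil]
      rw [if_neg hcond]

-- ===== VERDICT (by name: the statement is the Claim_ definition above) =====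
theorem translate_pid_bitmap_py_spec : Claim_equal_translate_pid_bitmap_py := by
  intro s pm g _ hpre
  unfold Spec_translate_pid_bitmap_py
  unfold Pre_translate_pid_bitmap_py at hpre
  rw [pv_alt_eq_foldl]
  unfold translate_pid_bitmap_py
  by_cases hnil : s.toList = []
  · rw [if_pos hnil]
    rw [← pv_main s.toList pm hpre g]
    have : pvOnes s.toList 0 = [] := by
      rw [hnil]; rfl
    rw [this]
    rfl
  · rw [if_neg hnil]
    rw [← PySem.Chars.findFrom_zero]
    have h0 : ((0 : Nat) : Int) = (0 : Int) := rfl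
    rw [← h0]
    rw [pv_aLoop_spec s.toList pm (s.toList.length + 1) 0 g (Nat.zero_le _) (by omega)]
    exact pv_main s.toList pm hpre g
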